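-- pv_equiv track=rewrite | github.com/Diego-Cordeiro0406/trybe-exercicios | Ciência_da_Computação/secao-1-introducao-a-python/dia-1-aprendendo-python/exercises/exercises.py | ret_smaller
-- ===== SOURCE A (Python) =====
-- def ret_smaller(li):
--     smaller = 0
--     for index in li:
--         smaller += index
--     for value in li:
--         if value < smaller:
--             smaller = value
--     return smaller
-- ===== SOURCE B (Python) =====
-- def ret_smaller(li):
--     total = 0
--     mn = None
--     for v in li:
--         total += v
--         if mn is None or v < mn:
--             mn = v
--     return 0 if mn is None else min(total, mn)
-- ===== Notes on version B (the rewrite author's own statement) =====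
-- stated objective: alternative
-- what changed: Single pass maintaining two accumulators (running sum and running minimum), combined with min at the end, instead of A's two sequential passes (sum, then min-against-sum).
import Mathlib
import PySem

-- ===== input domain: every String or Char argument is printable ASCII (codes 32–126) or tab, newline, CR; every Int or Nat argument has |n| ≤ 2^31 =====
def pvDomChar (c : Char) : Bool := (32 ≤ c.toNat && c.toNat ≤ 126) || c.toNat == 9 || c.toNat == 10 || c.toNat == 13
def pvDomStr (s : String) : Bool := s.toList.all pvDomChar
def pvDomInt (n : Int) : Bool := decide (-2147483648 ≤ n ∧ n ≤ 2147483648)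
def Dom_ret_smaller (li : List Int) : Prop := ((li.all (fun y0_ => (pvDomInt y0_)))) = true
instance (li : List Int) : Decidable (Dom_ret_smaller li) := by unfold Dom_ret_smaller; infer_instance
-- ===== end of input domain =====

-- B fuses A's two passes (sum, then min-against-sum) into one traversal with two accumulators; alternative decomposition, same cost.
-- ===== PORT A =====
def ret_smaller (li : List Int) : Int :=
  let smaller := li.foldl (fun smaller index => smaller + index) 0
  li.foldl (fun smaller value => if value < smaller then value else smaller) smaller

-- ===== PORT B =====
def ret_smaller_alt (li : List Int) : Int :=
  let r := li.foldl
    (fun (p : Int × Option Int) v =>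
      (p.1 + v, match p.2 with
        | none => some v
        | some m => if v < m then some v else some m))
    (0, none)
  match r.2 with
  | none => 0
  | some m => min r.1 m

-- ===== PRECONDITION & SPEC =====
def Spec_ret_smaller (li : List Int) (out : Int) : Prop := out = ret_smaller_alt li
instance (li : List Int) (out : Int) : Decidable (Spec_ret_smaller li out) := by unfold Spec_ret_smaller; infer_instance

-- ===== CLAIM (what is proved, stated in full; the proofs are below) =====
def Claim_equal_ret_smaller : Prop := ∀ (li : List Int), Dom_ret_smaller li → Spec_ret_smaller li (ret_smaller li)

-- ===== LEMMAS AND PROOFS =====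

-- A's second loop computes a fold of `min`.
theorem foldA_eq_min (li : List Int) (s : Int) :
    li.foldl (fun smaller value => if value < smaller then value else smaller) s
      = li.foldl min s := by
  induction li generalizing s with
  | nil => rfl
  | cons v t ih =>
      simp only [List.foldl_cons, ih]
      congr 1
      split <;> omega

theorem foldl_min_min (l : List Int) (a b : Int) :
    l.foldl min (min a b) = min a (l.foldl min b) := by
  induction l generalizing b with
  | nil => rfl
  | cons c t ih =>
      simp only [List.foldl_cons, min_assoc, ih]

-- first component of B's pair fold is the running sum
theorem fold_fst (li : List Int) (t : Int) (m : Option Int) :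
    (li.foldl
      (fun (p : Int × Option Int) v =>
        (p.1 + v, match p.2 with
          | none => some v
          | some m => if v < m then some v else some m))
      (t, m)).1 = li.foldl (fun s v => s + v) t := by
  induction li generalizing t m with
  | nil => rfl
  | cons v l ih => simp only [List.foldl_cons, ih]

-- second component of B's pair fold, once seeded, is the running minimum
theorem fold_snd_some (li : List Int) (t : Int) (m : Int) :
    (li.foldl
      (fun (p : Int × Option Int) v =>
        (p.1 + v, match p.2 with
          | none => some v
          | some m => if v < m then some v else some m))
      (t, some m)).2 = some (li.foldl min m) := by
  induction li generalizing t m with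
  | nil => rfl
  | cons v l ih =>
      have hstep : (if v < m then some v else some m) = some (min m v) := by
        by_cases h : v < m
        · rw [if_pos h, min_eq_right h.le]
        · rw [if_neg h, min_eq_left (by omega)]
      simp only [List.foldl_cons, hstep, ih]

-- ===== VERDICT (by name: the statement is the Claim_ definition above) =====
theorem ret_smaller_spec : Claim_equal_ret_smaller := by
  intro li _
  unfold Spec_ret_smaller ret_smaller ret_smaller_alt
  cases li with
  | nil => rfl
  | cons v t =>
      simp only [List.foldl_cons, foldA_eq_min, fold_fst, fold_snd_some]
      have hif : ∀ (a s : Int), (if a < s then a else s) = min s a := by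
        intro a s; rw [min_def]; split <;> split <;> omega
      rw [hif, foldl_min_min]
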